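-- pv_equiv track=rewrite | github.com/xjmdoo/cp-solutions | leetcode/concatenation-of-consecutive-binary-numbers/solve.py | faster
-- ===== SOURCE A (Python) =====
-- def faster(n):
--     s = 0
--     length = 0
--     for i in range(1, n + 1):
--         if i & (i - 1) == 0:
--             length += 1
--         s = ((s << length) | i) % 1000000007
--     return s
-- ===== SOURCE B (Python) =====
-- def faster(n):
--     MOD = 1000000007
--
--     def geo(r, m):
--         # sum of r**k for 0 <= k < m, mod MOD (divide and conquer, no loop)
--         if m <= 0:
--             return 0
--         if m % 2 == 1:
--             return (1 + r * geo(r, m - 1)) % MOD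
--         h = m // 2
--         return geo(r, h) * (1 + pow(r, h, MOD)) % MOD
--
--     def agh(r, m):
--         # sum of k * r**k for 0 <= k < m, mod MOD
--         if m <= 0:
--             return 0
--         if m % 2 == 1:
--             return (agh(r, m - 1) + (m - 1) * pow(r, m - 1, MOD)) % MOD
--         h = m // 2
--         a = agh(r, h)
--         return (a + pow(r, h, MOD) * (a + h * geo(r, h))) % MOD
--
--     # numbers of bit length L form the block [2**(L-1), 2**L - 1]; appending the whole
--     # block multiplies the accumulator by r**m (r = 2**L, m = block size) and adds
--     # sum((end - k) * r**k for k < m) = end * geo(r, m) - agh(r, m), all closed forms.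
--     s = 0
--     start = 1
--     while start <= n:
--         L = start.bit_length()
--         end = min((1 << L) - 1, n)
--         m = end - start + 1
--         r = 1 << L
--         s = (s * pow(r, m, MOD) + end * geo(r, m) - agh(r, m)) % MOD
--         start = end + 1
--     return s
-- ===== Notes on version B (the rewrite author's own statement) =====
-- stated objective: faster
-- what changed: Replaces the per-number O(n) loop with a closed-form computation: numbers are grouped by bit length and each whole block's contribution is evaluated at once with modular geometric and arithmetic-geometric series (divide-and-conquer geo/agh plus modular pow), so only O(log n) blocks of O(log n) work each.
import Mathlib
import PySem

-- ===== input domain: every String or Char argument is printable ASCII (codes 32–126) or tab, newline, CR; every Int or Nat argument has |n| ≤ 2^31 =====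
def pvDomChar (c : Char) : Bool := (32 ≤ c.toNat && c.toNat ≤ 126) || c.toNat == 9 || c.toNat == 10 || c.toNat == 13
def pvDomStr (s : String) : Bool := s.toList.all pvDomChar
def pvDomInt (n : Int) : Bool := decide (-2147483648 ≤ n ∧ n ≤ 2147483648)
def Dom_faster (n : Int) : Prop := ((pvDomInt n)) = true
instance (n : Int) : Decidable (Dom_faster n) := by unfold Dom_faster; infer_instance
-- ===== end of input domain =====

-- B computes the result block-by-bit-length with closed-form modular geometric /
-- arithmetic-geometric series instead of A's per-number loop; objective: faster (asymptotic).

-- ===== PORT A =====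
-- literal port of A: one pass i = 1..n, incrementing `length` at powers of two,
-- s = ((s << length) | i) % 1000000007 each step; state (s, length)
def faster (n : Int) : Int :=
  ((PySem.List.pyRange 1 (n + 1) 1).foldl
    (fun (st : Int × Nat) i =>
      let len : Nat := if PySem.Int.band i (i - 1) == 0 then st.2 + 1 else st.2
      (PySem.Int.mod (PySem.Int.bor (st.1 <<< len) i) 1000000007, len))
    (0, 0)).1

-- ===== PORT B =====
def pvP : Int := 1000000007

-- geo(r, m) of Source B: sum of r**k for k < m, mod MOD, by parity recursion.
-- Python's pow(r, h, MOD) is PySem.Int.powMod with a Nat exponent: exact here since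
-- every exponent Source B passes is nonnegative (h = m // 2 ≥ 0, m - 1 ≥ 0 on the reached calls).
def pvGeo (r m : Int) : Int :=
  if m ≤ 0 then 0
  else if PySem.Int.mod m 2 == 1 then
    PySem.Int.mod (1 + r * pvGeo r (m - 1)) pvP
  else
    let h := PySem.Int.floordiv m 2
    PySem.Int.mod (pvGeo r h * (1 + PySem.Int.powMod r h.toNat pvP)) pvP
termination_by m.toNat
decreasing_by
  · omega
  · rw [PySem.Int.floordiv_eq_ediv_of_pos (by norm_num)]; omega

-- agh(r, m) of Source B: sum of k * r**k for k < m, mod MOD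
def pvAgh (r m : Int) : Int :=
  if m ≤ 0 then 0
  else if PySem.Int.mod m 2 == 1 then
    PySem.Int.mod (pvAgh r (m - 1) + (m - 1) * PySem.Int.powMod r (m - 1).toNat pvP) pvP
  else
    let h := PySem.Int.floordiv m 2
    let a := pvAgh r h
    PySem.Int.mod (a + PySem.Int.powMod r h.toNat pvP * (a + h * pvGeo r h)) pvP
termination_by m.toNat
decreasing_by
  · omega
  · rw [PySem.Int.floordiv_eq_ediv_of_pos (by norm_num)]; omega

-- the while-loop of Source B: one block per bit length L, end = min((1 << L) - 1, n),
-- s = (s * pow(r, m, MOD) + end * geo(r, m) - agh(r, m)) % MOD with r = 1 << L, m = end - start + 1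
def fasterAltGo (n start s : Int) : Int :=
  if h : start ≤ n then
    let L : Nat := PySem.Int.bitLength start
    let e : Int := min (((1 : Int) <<< L) - 1) n
    let m : Int := e - start + 1
    let r : Int := (1 : Int) <<< L
    fasterAltGo n (e + 1)
      (PySem.Int.mod (s * PySem.Int.powMod r m.toNat pvP + e * pvGeo r m - pvAgh r m) pvP)
  else s
termination_by (n + 1 - start).toNat
decreasing_by
  have hb := PySem.Int.lt_two_pow_bitLength start
  have h1 : start ≤ (start.natAbs : Int) := Int.le_natAbs
  have h2 : ((2 ^ PySem.Int.bitLength start : Nat) : Int) = (1 : Int) <<< PySem.Int.bitLength start := by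
    simp [Int.shiftLeft_eq]
  have h6 : start ≤ min (((1 : Int) <<< PySem.Int.bitLength start) - 1) n := le_min (by omega) h
  have h5 := min_le_right (((1 : Int) <<< PySem.Int.bitLength start) - 1) n
  generalize (1 : Int) <<< PySem.Int.bitLength start = S at h5 h6 ⊢
  generalize min (S - 1) n = Mv at h5 h6 ⊢
  omega

def faster_alt (n : Int) : Int := fasterAltGo n 1 0

-- ===== PRECONDITION & SPEC =====
def Spec_faster (n : Int) (out : Int) : Prop := out = faster_alt n
instance (n : Int) (out : Int) : Decidable (Spec_faster n out) := by unfold Spec_faster; infer_instance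

-- ===== CLAIM (what is proved, stated in full; the proofs are below) =====
def Claim_equal_faster : Prop := ∀ (n : Int), Dom_faster n → Spec_faster n (faster n)

-- ===== LEMMAS AND PROOFS =====

lemma pvP_pos : (0 : Int) < pvP := by norm_num [pvP]

lemma modP_congr (x : Int) : PySem.Int.mod x pvP ≡ x [ZMOD pvP] := by
  rw [PySem.Int.mod_eq_emod_of_pos pvP_pos]
  exact Int.emod_emod_of_dvd x dvd_rfl

lemma mod_eq_of_modEq {x y : Int} (h : x ≡ y [ZMOD pvP]) :
    PySem.Int.mod x pvP = PySem.Int.mod y pvP := by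
  rw [PySem.Int.mod_eq_emod_of_pos pvP_pos, PySem.Int.mod_eq_emod_of_pos pvP_pos]
  exact h

lemma powMod_congr (r : Int) (e : Nat) : PySem.Int.powMod r e pvP ≡ r ^ e [ZMOD pvP] := by
  rw [PySem.Int.powMod_eq_emod r e pvP_pos]
  exact Int.emod_emod_of_dvd _ dvd_rfl

lemma mod2_natCast (t : Nat) : PySem.Int.mod ((t : Nat) : Int) 2 = (((t % 2 : Nat)) : Int) := by
  rw [PySem.Int.mod_eq_emod_of_pos (by norm_num)]
  omega

-- canonical step: each i contributes a shift by its own bit length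
def stepS (s i : Int) : Int :=
  PySem.Int.mod (s * ((1 : Int) <<< PySem.Int.bitLength i) + i) 1000000007

-- pvGeo computes the geometric sum mod pvP
lemma pvGeo_spec : ∀ (m : Nat) (r : Int),
    pvGeo r (m : Int) ≡ (∑ k ∈ Finset.range m, r ^ k) [ZMOD pvP] := by
  intro m
  induction m using Nat.strong_induction_on with
  | _ m ih =>
    intro r
    match m with
    | 0 => simp [pvGeo]
    | Nat.succ t =>
      rw [pvGeo]
      rw [if_neg (by push_cast; omega : ¬ ((t + 1 : Nat) : Int) ≤ 0)]
      by_cases hodd : (t + 1) % 2 = 1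
      · have hcond : (PySem.Int.mod ((t + 1 : Nat) : Int) 2 == 1) = true := by
          rw [mod2_natCast, hodd]; simp
        rw [if_pos hcond]
        have hc : ((t + 1 : Nat) : Int) - 1 = (t : Int) := by push_cast; ring
        rw [hc]
        refine (modP_congr _).trans ?_
        calc (1 : Int) + r * pvGeo r (t : Int)
            ≡ 1 + r * ∑ k ∈ Finset.range t, r ^ k [ZMOD pvP] :=
              Int.ModEq.add_left 1 (Int.ModEq.mul_left r (ih t (by omega) r))
          _ = ∑ k ∈ Finset.range (t + 1), r ^ k := by
              rw [Finset.sum_range_succ', pow_zero, Finset.mul_sum, add_comm]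
              congr 1
              apply Finset.sum_congr rfl
              intro k _
              ring
      · rw [if_neg (by
          intro hx
          rw [mod2_natCast, beq_iff_eq] at hx
          omega)]
        obtain ⟨hh, hhh⟩ : ∃ hh, t + 1 = hh + hh := ⟨(t + 1) / 2, by omega⟩
        have hfd : PySem.Int.floordiv ((t + 1 : Nat) : Int) 2 = ((hh : Nat) : Int) := by
          rw [PySem.Int.floordiv_eq_ediv_of_pos (by norm_num)]; omega
        show PySem.Int.mod
            (pvGeo r (PySem.Int.floordiv ((t + 1 : Nat) : Int) 2) *
              (1 + PySem.Int.powMod r (PySem.Int.floordiv ((t + 1 : Nat) : Int) 2).toNat pvP)) pvP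
          ≡ (∑ k ∈ Finset.range (t + 1), r ^ k) [ZMOD pvP]
        rw [hfd, Int.toNat_natCast]
        refine (modP_congr _).trans ?_
        calc pvGeo r ((hh : Nat) : Int) * (1 + PySem.Int.powMod r hh pvP)
            ≡ (∑ k ∈ Finset.range hh, r ^ k) * (1 + r ^ hh) [ZMOD pvP] :=
              Int.ModEq.mul (ih hh (by omega) r) (Int.ModEq.add_left 1 (powMod_congr r hh))
          _ = ∑ k ∈ Finset.range (t + 1), r ^ k := by
              rw [hhh, Finset.sum_range_add, mul_add, mul_one]
              congr 1
              rw [Finset.sum_mul]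
              apply Finset.sum_congr rfl
              intro k _
              rw [pow_add]
              ring

-- pvAgh computes the arithmetic-geometric sum mod pvP
lemma pvAgh_spec : ∀ (m : Nat) (r : Int),
    pvAgh r (m : Int) ≡ (∑ k ∈ Finset.range m, (k : Int) * r ^ k) [ZMOD pvP] := by
  intro m
  induction m using Nat.strong_induction_on with
  | _ m ih =>
    intro r
    match m with
    | 0 => simp [pvAgh]
    | Nat.succ t =>
      rw [pvAgh]
      rw [if_neg (by push_cast; omega : ¬ ((t + 1 : Nat) : Int) ≤ 0)]
      by_cases hodd : (t + 1) % 2 = 1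
      · have hcond : (PySem.Int.mod ((t + 1 : Nat) : Int) 2 == 1) = true := by
          rw [mod2_natCast, hodd]; simp
        rw [if_pos hcond]
        have hc : ((t + 1 : Nat) : Int) - 1 = (t : Int) := by push_cast; ring
        rw [hc, Int.toNat_natCast]
        refine (modP_congr _).trans ?_
        calc pvAgh r (t : Int) + (t : Int) * PySem.Int.powMod r t pvP
            ≡ (∑ k ∈ Finset.range t, (k : Int) * r ^ k) + (t : Int) * r ^ t [ZMOD pvP] :=
              Int.ModEq.add (ih t (by omega) r) (Int.ModEq.mul_left _ (powMod_congr r t))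
          _ = ∑ k ∈ Finset.range (t + 1), (k : Int) * r ^ k := by
              rw [Finset.sum_range_succ]
      · rw [if_neg (by
          intro hx
          rw [mod2_natCast, beq_iff_eq] at hx
          omega)]
        obtain ⟨hh, hhh⟩ : ∃ hh, t + 1 = hh + hh := ⟨(t + 1) / 2, by omega⟩
        have hfd : PySem.Int.floordiv ((t + 1 : Nat) : Int) 2 = ((hh : Nat) : Int) := by
          rw [PySem.Int.floordiv_eq_ediv_of_pos (by norm_num)]; omega
        show PySem.Int.mod
            (pvAgh r (PySem.Int.floordiv ((t + 1 : Nat) : Int) 2) +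
              PySem.Int.powMod r (PySem.Int.floordiv ((t + 1 : Nat) : Int) 2).toNat pvP *
                (pvAgh r (PySem.Int.floordiv ((t + 1 : Nat) : Int) 2) +
                  PySem.Int.floordiv ((t + 1 : Nat) : Int) 2 *
                    pvGeo r (PySem.Int.floordiv ((t + 1 : Nat) : Int) 2))) pvP
          ≡ (∑ k ∈ Finset.range (t + 1), (k : Int) * r ^ k) [ZMOD pvP]
        rw [hfd, Int.toNat_natCast]
        refine (modP_congr _).trans ?_
        have hA := ih hh (by omega) r
        calc pvAgh r ((hh : Nat) : Int) +
              PySem.Int.powMod r hh pvP *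
                (pvAgh r ((hh : Nat) : Int) + ((hh : Nat) : Int) * pvGeo r ((hh : Nat) : Int))
            ≡ (∑ k ∈ Finset.range hh, (k : Int) * r ^ k) +
              r ^ hh * ((∑ k ∈ Finset.range hh, (k : Int) * r ^ k) +
                ((hh : Nat) : Int) * ∑ k ∈ Finset.range hh, r ^ k) [ZMOD pvP] :=
              Int.ModEq.add hA
                (Int.ModEq.mul (powMod_congr r hh)
                  (Int.ModEq.add hA (Int.ModEq.mul_left _ (pvGeo_spec hh r))))
          _ = ∑ k ∈ Finset.range (t + 1), (k : Int) * r ^ k := by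
              have key : ∑ k ∈ Finset.range hh, ((hh + k : Nat) : Int) * r ^ (hh + k)
                  = r ^ hh * ((∑ k ∈ Finset.range hh, (k : Int) * r ^ k) +
                    ((hh : Nat) : Int) * ∑ k ∈ Finset.range hh, r ^ k) := by
                simp only [Finset.mul_sum, mul_add, ← Finset.sum_add_distrib]
                apply Finset.sum_congr rfl
                intro k _
                push_cast
                rw [pow_add]
                ring
              rw [hhh, Finset.sum_range_add, key]

-- the canonical mod-fold over one block has a closed form
lemma block_closed : ∀ (t : Nat) (a s r : Int),
    (PySem.List.pyRange a (a + ((t : Nat) : Int) + 1) 1).foldl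
      (fun s i => PySem.Int.mod (s * r + i) pvP) s
    = PySem.Int.mod
        (s * r ^ (t + 1) + ∑ k ∈ Finset.range (t + 1), ((a + (t : Int)) - (k : Int)) * r ^ k) pvP := by
  intro t
  induction t with
  | zero =>
    intro a s r
    rw [show a + ((0 : Nat) : Int) + 1 = a + 1 by push_cast; ring,
      PySem.List.pyRange_one_singleton]
    simp [pow_one]
  | succ t ih =>
    intro a s r
    rw [show a + ((t + 1 : Nat) : Int) + 1 = (a + ((t : Nat) : Int) + 1) + 1 by push_cast; ring,
      PySem.List.pyRange_one_succ_right (by omega), List.foldl_append, ih]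
    simp only [List.foldl_cons, List.foldl_nil]
    refine (mod_eq_of_modEq
      (Int.ModEq.add_right _ (Int.ModEq.mul_right r (modP_congr _)))).trans ?_
    congr 1
    have hT : ∑ k ∈ Finset.range (t + 1 + 1), ((a + ((t + 1 : Nat) : Int)) - (k : Int)) * r ^ k
        = (a + ((t : Nat) : Int) + 1) +
          r * ∑ k ∈ Finset.range (t + 1), ((a + (t : Int)) - (k : Int)) * r ^ k := by
      rw [Finset.sum_range_succ', pow_zero]
      have hstep : (∑ k ∈ Finset.range (t + 1),
            ((a + ((t + 1 : Nat) : Int)) - ((k + 1 : Nat) : Int)) * r ^ (k + 1))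
          = r * ∑ k ∈ Finset.range (t + 1), ((a + (t : Int)) - (k : Int)) * r ^ k := by
        rw [Finset.mul_sum]
        apply Finset.sum_congr rfl
        intro k _
        push_cast
        ring
      rw [hstep]
      push_cast
      ring
    rw [hT]
    ring

-- ===== A-side lemmas =====

lemma land_two_mul_add_one (a b : Nat) : (2 * a + 1) &&& (2 * b) = 2 * (a &&& b) := by
  apply Nat.eq_of_testBit_eq
  intro i
  cases i with
  | zero => simp [Nat.mul_comm 2]
  | succ j =>
    rw [Nat.testBit_and]
    have hd : (a * 2 + 1) / 2 = a := by omega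
    simp [Nat.testBit_succ, Nat.mul_comm 2, hd, Nat.testBit_and]

lemma lor_two_mul (a b : Nat) : (2 * a) ||| (2 * b) = 2 * (a ||| b) := by
  apply Nat.eq_of_testBit_eq
  intro i
  cases i with
  | zero => simp [Nat.mul_comm 2]
  | succ j =>
    rw [Nat.testBit_or]
    simp [Nat.testBit_succ, Nat.mul_comm 2, Nat.testBit_or]

lemma lor_two_mul_add_one (a b : Nat) : (2 * a) ||| (2 * b + 1) = 2 * (a ||| b) + 1 := by
  apply Nat.eq_of_testBit_eq
  intro i
  cases i with
  | zero => simp [Nat.mul_comm 2]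
  | succ j =>
    rw [Nat.testBit_or]
    have hd : (b * 2 + 1) / 2 = b := by omega
    have hd2 : ((a ||| b) * 2 + 1) / 2 = a ||| b := by omega
    simp [Nat.testBit_succ, Nat.mul_comm 2, hd, hd2, Nat.testBit_or]

lemma shiftLeft_lor_eq_add : ∀ (L a b : Nat), b < 2 ^ L → (a <<< L) ||| b = a * 2 ^ L + b := by
  intro L
  induction L with
  | zero =>
    intro a b hb
    have hb0 : b = 0 := by omega
    subst hb0
    simp
  | succ K ih =>
    intro a b hb
    have hsh : a <<< (K + 1) = 2 * (a <<< K) := by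
      simp [Nat.shiftLeft_eq, Nat.pow_succ]; ring
    have hb2 : b / 2 < 2 ^ K := by
      have := Nat.pow_succ 2 K; omega
    rcases Nat.even_or_odd b with ⟨t, ht⟩ | ⟨t, ht⟩
    · have hbt : b = 2 * t := by omega
      have htlt : t = b / 2 := by omega
      rw [hsh, hbt, lor_two_mul, ih a t (by omega)]
      rw [Nat.pow_succ]; ring
    · have hbt : b = 2 * t + 1 := by omega
      have htlt : t = b / 2 := by omega
      rw [hsh, hbt, lor_two_mul_add_one, ih a t (by omega)]
      rw [Nat.pow_succ]; ring

-- A's branch: bit_length(m+1) is bit_length(m) + 1 exactly when m+1 is a power of two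
lemma bl_succ : ∀ (m : Nat), PySem.Int.bitLength ((m + 1 : Nat) : Int) =
    (if (m + 1) &&& m = 0 then PySem.Int.bitLength (m : Int) + 1 else PySem.Int.bitLength (m : Int)) := by
  intro m
  induction m using Nat.strong_induction_on with
  | _ m ih =>
    match m with
    | 0 => decide
    | Nat.succ m' =>
      have hm : 1 ≤ m' + 1 := by omega
      rcases Nat.even_or_odd (m' + 2) with ⟨t, ht⟩ | ⟨t, ht⟩
      · have ht2 : m' + 2 = 2 * t := by omega
        have htpos : 1 ≤ t := by omega
        have e1 : PySem.Int.bitLength ((m' + 2 : Nat) : Int) = PySem.Int.bitLength (t : Int) + 1 := by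
          rw [PySem.Int.bitLength_natCast (m := m' + 2) (by omega)]
          congr 2; omega
        have e2 : PySem.Int.bitLength ((m' + 1 : Nat) : Int) = PySem.Int.bitLength ((t - 1 : Nat) : Int) + 1 := by
          rw [PySem.Int.bitLength_natCast (m := m' + 1) (by omega)]
          congr 2; omega
        have e3 : (m' + 2) &&& (m' + 1) = 2 * (t &&& (t - 1)) := by
          have : m' + 1 = 2 * (t - 1) + 1 := by omega
          rw [ht2, this, Nat.land_comm, land_two_mul_add_one, Nat.land_comm (t - 1) t]
        have ihh := ih (t - 1) (by omega)
        have htt : t - 1 + 1 = t := by omega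
        rw [htt] at ihh
        rw [e1, e2, e3]
        by_cases hc : t &&& (t - 1) = 0
        · rw [if_pos hc] at ihh; rw [ihh, if_pos (by omega)]
        · rw [if_neg hc] at ihh; rw [ihh, if_neg (by intro hx; exact hc (by omega))]
      · have ht2 : m' + 2 = 2 * t + 1 := by omega
        have htpos : 1 ≤ t := by omega
        have e1 : PySem.Int.bitLength ((m' + 2 : Nat) : Int) = PySem.Int.bitLength (t : Int) + 1 := by
          rw [PySem.Int.bitLength_natCast (m := m' + 2) (by omega)]
          congr 2; omega
        have e2 : PySem.Int.bitLength ((m' + 1 : Nat) : Int) = PySem.Int.bitLength (t : Int) + 1 := by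
          rw [PySem.Int.bitLength_natCast (m := m' + 1) (by omega)]
          congr 2; omega
        have e3 : (m' + 2) &&& (m' + 1) = 2 * t := by
          have h1 : m' + 2 = 2 * t + 1 := ht2
          have h2 : m' + 1 = 2 * t := by omega
          rw [h1, h2, land_two_mul_add_one]
          simp
        rw [e1, e2, e3, if_neg (by omega)]

lemma bitLength_eq_of_bounds (i : Int) (L : Nat) (h1 : 1 ≤ i) (hL : 1 ≤ L)
    (h2 : ((2 ^ (L - 1) : Nat) : Int) ≤ i) (h3 : i < ((2 ^ L : Nat) : Int)) :
    PySem.Int.bitLength i = L := by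
  have hub := PySem.Int.lt_two_pow_bitLength i
  have hlb := PySem.Int.two_pow_bitLength_le i (by omega)
  have hna : (i.natAbs : Int) = i := Int.natAbs_of_nonneg (by omega)
  have h2' : 2 ^ (L - 1) ≤ i.natAbs := by omega
  have h3' : i.natAbs < 2 ^ L := by omega
  by_contra hne
  rcases Nat.lt_or_ge (PySem.Int.bitLength i) L with hlt | hge
  · have hp : (2 : Nat) ^ PySem.Int.bitLength i ≤ 2 ^ (L - 1) :=
      Nat.pow_le_pow_right (by norm_num) (by omega)
    omega
  · have hgt : L < PySem.Int.bitLength i := by omega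
    have hp : (2 : Nat) ^ L ≤ 2 ^ (PySem.Int.bitLength i - 1) :=
      Nat.pow_le_pow_right (by norm_num) (by omega)
    omega

lemma foldl_stepS_nonneg : ∀ (l : List Int) (s : Int), 0 ≤ s → 0 ≤ l.foldl stepS s := by
  intro l
  induction l with
  | nil => intro s hs; simpa using hs
  | cons a t ih =>
    intro s hs
    simp only [List.foldl_cons]
    exact ih _ (PySem.Int.mod_nonneg _ (by norm_num))

-- Int-side: (s << L) | i = s * (1 << L) + i when 0 ≤ s, 0 ≤ i < 2^L
lemma bor_shift_eq_add (s i : Int) (L : Nat) (hs : 0 ≤ s) (hi : 0 ≤ i)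
    (hlt : i < ((2 ^ L : Nat) : Int)) :
    PySem.Int.bor (s <<< L) i = s * ((1 : Int) <<< L) + i := by
  have hsh : s <<< L = ((s.toNat <<< L : Nat) : Int) := by
    rw [Int.shiftLeft_eq]
    rw [Nat.shiftLeft_eq]
    push_cast
    rw [Int.toNat_of_nonneg hs]
  have hshn : (0 : Int) ≤ s <<< L := by rw [hsh]; positivity
  rw [PySem.Int.bor_of_nonneg hshn hi]
  rw [hsh]
  have : ((s.toNat <<< L : Nat) : Int).toNat = s.toNat <<< L := by
    exact Int.toNat_natCast _
  rw [this]
  rw [shiftLeft_lor_eq_add L s.toNat i.toNat (by omega)]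
  have h1 : (1 : Int) <<< L = ((2 ^ L : Nat) : Int) := by
    rw [Int.shiftLeft_eq]; push_cast; ring
  push_cast
  rw [Int.toNat_of_nonneg hs, Int.toNat_of_nonneg hi, h1]
  push_cast; ring

-- A's fold tracks (canonical fold, bit_length of the last processed index)
lemma A_fold : ∀ (m : Nat),
    (PySem.List.pyRange 1 ((m : Int) + 1) 1).foldl
      (fun (st : Int × Nat) i =>
        let len : Nat := if PySem.Int.band i (i - 1) == 0 then st.2 + 1 else st.2
        (PySem.Int.mod (PySem.Int.bor (st.1 <<< len) i) 1000000007, len))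
      (0, 0)
    = ((PySem.List.pyRange 1 ((m : Int) + 1) 1).foldl stepS 0, PySem.Int.bitLength (m : Int)) := by
  intro m
  induction m with
  | zero =>
    rw [PySem.List.pyRange_one_eq_nil (by norm_num)]
    simp
  | succ m ih =>
    have hsplit : PySem.List.pyRange 1 ((↑(m + 1) : Int) + 1) 1
        = PySem.List.pyRange 1 ((m : Int) + 1) 1 ++ [(m : Int) + 1] := by
      push_cast
      exact PySem.List.pyRange_one_succ_right (by omega)
    rw [hsplit, List.foldl_append, List.foldl_append, ih]
    simp only [List.foldl_cons, List.foldl_nil]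
    have hcast : ((m : Int) + 1) = ((m + 1 : Nat) : Int) := by push_cast; ring
    have hband : PySem.Int.band ((m : Int) + 1) (((m : Int) + 1) - 1)
        = (((m + 1) &&& m : Nat) : Int) := by
      have : ((m : Int) + 1) - 1 = (m : Int) := by ring
      rw [this, hcast, PySem.Int.band_natCast]
    have hlen : (if PySem.Int.band ((m : Int) + 1) (((m : Int) + 1) - 1) == 0
          then PySem.Int.bitLength (m : Int) + 1 else PySem.Int.bitLength (m : Int))
        = PySem.Int.bitLength ((m + 1 : Nat) : Int) := by
      rw [hband, bl_succ m]
      by_cases hc : (m + 1) &&& m = 0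
      · rw [if_pos hc, hc]; simp
      · rw [if_neg hc, if_neg (by simp [hc])]
    simp only [hlen]
    have hs0 : 0 ≤ (PySem.List.pyRange 1 ((m : Int) + 1) 1).foldl stepS 0 :=
      foldl_stepS_nonneg _ 0 le_rfl
    have hub := PySem.Int.lt_two_pow_bitLength ((m + 1 : Nat) : Int)
    have hna : (((m + 1 : Nat) : Int)).natAbs = m + 1 := by
      omega
    rw [hna] at hub
    have hbor := bor_shift_eq_add ((PySem.List.pyRange 1 ((m : Int) + 1) 1).foldl stepS 0)
      ((m : Int) + 1) (PySem.Int.bitLength ((m + 1 : Nat) : Int)) hs0 (by omega)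
      (by omega)
    rw [hbor]
    unfold stepS
    rw [hcast]

-- B's block loop computes the canonical fold
lemma B_go : ∀ (k : Nat) (n start s : Int), (n + 1 - start).toNat = k → 1 ≤ start →
    fasterAltGo n start s = (PySem.List.pyRange start (n + 1) 1).foldl stepS s := by
  intro k
  induction k using Nat.strong_induction_on with
  | _ k ih =>
    intro n start s hk h1
    rw [fasterAltGo.eq_def]
    by_cases h : start ≤ n
    · rw [dif_pos h]
      show fasterAltGo n (min (((1 : Int) <<< PySem.Int.bitLength start) - 1) n + 1)
          (PySem.Int.mod
            (s * PySem.Int.powMod ((1 : Int) <<< PySem.Int.bitLength start)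
                (min (((1 : Int) <<< PySem.Int.bitLength start) - 1) n - start + 1).toNat pvP +
              min (((1 : Int) <<< PySem.Int.bitLength start) - 1) n *
                pvGeo ((1 : Int) <<< PySem.Int.bitLength start)
                  (min (((1 : Int) <<< PySem.Int.bitLength start) - 1) n - start + 1) -
              pvAgh ((1 : Int) <<< PySem.Int.bitLength start)
                (min (((1 : Int) <<< PySem.Int.bitLength start) - 1) n - start + 1)) pvP)
        = (PySem.List.pyRange start (n + 1) 1).foldl stepS s
      have hpow : (1 : Int) <<< PySem.Int.bitLength start
          = ((2 ^ PySem.Int.bitLength start : Nat) : Int) := by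
        simp [Int.shiftLeft_eq]
      have hna : ((start.natAbs : Nat) : Int) = start := Int.natAbs_of_nonneg (by omega)
      have hub := PySem.Int.lt_two_pow_bitLength start
      have hlb := PySem.Int.two_pow_bitLength_le start (by omega)
      have hL1 : 1 ≤ PySem.Int.bitLength start := by
        by_contra hc
        have h0 : PySem.Int.bitLength start = 0 := by omega
        rw [h0] at hub
        simp at hub
        omega
      set L := PySem.Int.bitLength start with hLdef
      set r := (1 : Int) <<< L with hrdef
      have hse : start ≤ min (r - 1) n := by
        refine le_min ?_ h
        have hx : ((start.natAbs : Nat) : Int) < ((2 ^ L : Nat) : Int) := by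
          exact_mod_cast hub
        omega
      have hen := min_le_right (r - 1) n
      have hml := min_le_left (r - 1) n
      rw [hpow] at hml
      set e := min (r - 1) n with hedef
      obtain ⟨t, ht⟩ : ∃ t : Nat, e = start + ((t : Nat) : Int) :=
        ⟨(e - start).toNat, by omega⟩
      have hm : e - start + 1 = ((t + 1 : Nat) : Int) := by push_cast; omega
      rw [hm, Int.toNat_natCast]
      -- split the range at e + 1
      rw [PySem.List.pyRange_one_append start (e + 1) (n + 1) (by omega) (by omega),
        List.foldl_append]
      -- on the block every index has bit length L
      have hconst : ∀ (acc : Int), ∀ i ∈ PySem.List.pyRange start (e + 1) 1,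
          stepS acc i = PySem.Int.mod (acc * r + i) pvP := by
        intro acc i hi
        rw [PySem.List.mem_pyRange_one] at hi
        have hilt : i < ((2 ^ L : Nat) : Int) := by omega
        have hige : ((2 ^ (L - 1) : Nat) : Int) ≤ i := by
          have hx : ((2 ^ (L - 1) : Nat) : Int) ≤ ((start.natAbs : Nat) : Int) := by
            exact_mod_cast hlb
          omega
        have hbl : PySem.Int.bitLength i = L :=
          bitLength_eq_of_bounds i L (by omega) hL1 hige hilt
        unfold stepS
        rw [hbl, ← hrdef]
        rfl
      rw [PySem.List.foldl_congr_mem _ _ _ _ hconst]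
      -- closed form of the block fold
      have hrange : e + 1 = start + ((t : Nat) : Int) + 1 := by omega
      rw [hrange, block_closed t start s r,
        show start + ((t : Nat) : Int) = e from by omega]
      -- the two block values are equal mod pvP
      have hVW : PySem.Int.mod (s * PySem.Int.powMod r (t + 1) pvP +
            e * pvGeo r ((t + 1 : Nat) : Int) - pvAgh r ((t + 1 : Nat) : Int)) pvP
          = PySem.Int.mod (s * r ^ (t + 1) +
            ∑ k ∈ Finset.range (t + 1), (e - (k : Int)) * r ^ k) pvP := by
        apply mod_eq_of_modEq
        have hsum : ∑ k ∈ Finset.range (t + 1), (e - (k : Int)) * r ^ k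
            = e * (∑ k ∈ Finset.range (t + 1), r ^ k) -
              ∑ k ∈ Finset.range (t + 1), (k : Int) * r ^ k := by
          rw [Finset.mul_sum, ← Finset.sum_sub_distrib]
          exact Finset.sum_congr rfl (fun k _ => by ring)
        calc s * PySem.Int.powMod r (t + 1) pvP + e * pvGeo r ((t + 1 : Nat) : Int) -
              pvAgh r ((t + 1 : Nat) : Int)
            ≡ s * r ^ (t + 1) + e * (∑ k ∈ Finset.range (t + 1), r ^ k) -
              ∑ k ∈ Finset.range (t + 1), (k : Int) * r ^ k [ZMOD pvP] :=
              Int.ModEq.sub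
                (Int.ModEq.add (Int.ModEq.mul_left s (powMod_congr r (t + 1)))
                  (Int.ModEq.mul_left e (pvGeo_spec (t + 1) r)))
                (pvAgh_spec (t + 1) r)
          _ = s * r ^ (t + 1) + ∑ k ∈ Finset.range (t + 1), (e - (k : Int)) * r ^ k := by
              rw [hsum]; ring
      rw [hVW]
      rw [ih (n + 1 - (e + 1)).toNat (by omega) n (e + 1) _ rfl (by omega)]
    · rw [dif_neg h]
      rw [PySem.List.pyRange_one_eq_nil (by omega)]
      rfl

-- ===== VERDICT (by name: the statement is the Claim_ definition above) =====
theorem faster_spec : Claim_equal_faster := by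
  intro n _
  unfold Spec_faster faster faster_alt
  rw [B_go (n + 1 - 1).toNat n 1 0 rfl le_rfl]
  by_cases hn : n ≤ 0
  · rw [PySem.List.pyRange_one_eq_nil (by omega)]
    rfl
  · have hm : n = ((n.toNat : Nat) : Int) := by omega
    rw [hm, A_fold n.toNat]
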